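-- pv_equiv track=rewrite | github.com/RicardoMYang/FactorAnalysis | utils.py | longest_positive_length
-- ===== SOURCE A (Python) =====
-- def longest_positive_length(returns):
--     longest_length = 0
--     length = 0
--     for ret in returns:
--         if ret < 0:
--             length = 0
--         else:
--             length+=1
--             longest_length = max([length, longest_length])
--     return longest_length
-- ===== SOURCE B (Python) =====
-- def longest_positive_length(returns):
--     best = 0
--     i = 0
--     n = len(returns)
--     while i < n:
--         if returns[i] < 0:
--             i += 1
--         else:
--             j = i
--             while j < n and not returns[j] < 0:
--                 j += 1
--             best = max(best, j - i)
--             i = j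
--     return best
-- ===== Notes on version B (the rewrite author's own statement) =====
-- stated objective: alternative
-- what changed: Instead of A's per-element accumulator carrying (current length, best) and taking a max at every element, B decomposes the list into maximal runs: skip negatives, measure the whole non-negative run at once, take one max per run, and jump past it.
import Mathlib
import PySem

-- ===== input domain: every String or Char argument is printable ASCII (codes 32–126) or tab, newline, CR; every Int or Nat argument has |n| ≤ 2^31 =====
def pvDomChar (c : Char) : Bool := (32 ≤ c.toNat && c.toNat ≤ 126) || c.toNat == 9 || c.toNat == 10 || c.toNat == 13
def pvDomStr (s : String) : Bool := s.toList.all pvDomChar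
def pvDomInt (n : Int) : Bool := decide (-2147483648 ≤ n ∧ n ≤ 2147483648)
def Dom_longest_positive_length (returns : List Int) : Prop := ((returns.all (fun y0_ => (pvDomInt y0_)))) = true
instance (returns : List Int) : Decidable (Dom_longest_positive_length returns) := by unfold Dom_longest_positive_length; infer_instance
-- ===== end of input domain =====

-- B replaces A's per-element (best, current-length) accumulator by a run decomposition:
-- skip negatives, measure each maximal non-negative run at once, one max per run (alternative, same cost).

-- ===== PORT A =====
-- A: single fold carrying (longest_length, length).
def longest_positive_length (returns : List Int) : Int :=
  (returns.foldl
    (fun (s : Int × Int) ret =>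
      if ret < 0 then (s.1, 0)
      else
        let length := s.2 + 1
        (max length s.1, length))
    (0, 0)).1

-- ===== PORT B =====
-- B's outer while loop over the suffix starting at i: element negative → step past it;
-- otherwise the inner loop counts the whole non-negative run (= takeWhile length),
-- one max per run, then jump to its end (= dropWhile).
def lplGo (rest : List Int) (best : Int) : Int :=
  match rest with
  | [] => best
  | x :: xs =>
    if x < 0 then lplGo xs best
    else
      let run := ((x :: xs).takeWhile (fun y => !decide (y < 0))).length
      lplGo ((x :: xs).dropWhile (fun y => !decide (y < 0))) (max best (run : Int))
  termination_by rest.length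
  decreasing_by
  · simp
  · simp only [List.dropWhile_cons]
    have hx : (!decide (x < 0)) = true := by simp_all
    simp only [hx]
    have := List.length_dropWhile_le (fun y => !decide (y < 0)) xs
    simp
    omega

def longest_positive_length_alt (returns : List Int) : Int :=
  lplGo returns 0

-- ===== PRECONDITION & SPEC =====
def Spec_longest_positive_length (returns : List Int) (out : Int) : Prop := out = longest_positive_length_alt returns
instance (returns : List Int) (out : Int) : Decidable (Spec_longest_positive_length returns out) := by unfold Spec_longest_positive_length; infer_instance

-- ===== CLAIM (what is proved, stated in full; the proofs are below) =====
def Claim_equal_longest_positive_length : Prop := ∀ (returns : List Int), Dom_longest_positive_length returns → Spec_longest_positive_length returns (longest_positive_length returns)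

-- ===== LEMMAS AND PROOFS =====

-- Reference function: best tail value given the current run length l.
def lplAux (l : Int) : List Int → Int
  | [] => l
  | x :: xs => if x < 0 then max l (lplAux 0 xs) else lplAux (l + 1) xs

theorem lplAux_ge (xs : List Int) : ∀ l : Int, l ≤ lplAux l xs := by
  induction xs with
  | nil => intro l; simp [lplAux]
  | cons x xs ih =>
    intro l
    simp only [lplAux]
    split
    · exact le_max_left _ _
    · exact le_trans (by omega) (ih (l + 1))

theorem lplFold_eq (xs : List Int) : ∀ L l : Int, 0 ≤ l → l ≤ L →
    (xs.foldl
      (fun (s : Int × Int) ret =>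
        if ret < 0 then (s.1, 0)
        else
          let length := s.2 + 1
          (max length s.1, length))
      (L, l)).1 = max L (lplAux l xs) := by
  induction xs with
  | nil => intro L l h0 hL; simp [lplAux]; omega
  | cons x xs ih =>
    intro L l h0 hL
    simp only [List.foldl_cons, lplAux]
    by_cases hx : x < 0
    · simp only [if_pos hx]
      rw [ih L 0 le_rfl (by omega)]
      have := lplAux_ge xs (0 : Int)
      omega
    · simp only [if_neg hx]
      rw [ih (max (l + 1) L) (l + 1) (by omega) (le_max_left _ _)]
      have := lplAux_ge xs (l + 1)
      omega

theorem lplAux_run (xs : List Int) : ∀ l : Int, 0 ≤ l →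
    lplAux l xs = max (l + ((xs.takeWhile (fun y => !decide (y < 0))).length : Int))
      (lplAux 0 (xs.dropWhile (fun y => !decide (y < 0)))) := by
  induction xs with
  | nil => intro l h; simp [lplAux]; omega
  | cons x xs ih =>
    intro l h
    by_cases hx : x < 0
    · have hb : (!decide (x < 0)) = false := by simp [hx]
      simp only [lplAux, if_pos hx, List.takeWhile_cons, List.dropWhile_cons, hb]
      simp only [Bool.false_eq_true, if_neg (by simp : ¬False), List.length_nil]
      have h1 := lplAux_ge xs (0 : Int)
      simp only [lplAux, if_pos hx]
      push_cast
      omega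
    · have hb : (!decide (x < 0)) = true := by simp [hx]
      simp only [lplAux, if_neg hx, List.takeWhile_cons, List.dropWhile_cons, hb, if_true]
      rw [ih (l + 1) (by omega)]
      have : ((x :: xs.takeWhile (fun y => !decide (y < 0))).length : Int)
          = ((xs.takeWhile (fun y => !decide (y < 0))).length : Int) + 1 := by
        simp
      omega

theorem lplGo_eq (n : ℕ) : ∀ xs : List Int, xs.length ≤ n → ∀ best : Int, 0 ≤ best →
    lplGo xs best = max best (lplAux 0 xs) := by
  induction n with
  | zero =>
    intro xs hn best hb
    have : xs = [] := List.eq_nil_of_length_eq_zero (by omega)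
    subst this
    simp [lplGo, lplAux]; omega
  | succ n ih =>
    intro xs hn best hb
    match xs with
    | [] => simp [lplGo, lplAux]; omega
    | x :: xs =>
      by_cases hx : x < 0
      · rw [lplGo, if_pos hx, ih xs (by simpa using Nat.lt_succ_iff.mp (by simpa using hn)) best hb]
        have := lplAux_ge xs (0 : Int)
        simp only [lplAux, if_pos hx]
        omega
      · have hb' : (!decide (x < 0)) = true := by simp [hx]
        rw [lplGo, if_neg hx]
        have hdrop : (x :: xs).dropWhile (fun y => !decide (y < 0)) =
            xs.dropWhile (fun y => !decide (y < 0)) := by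
          simp [hb']
        have hlen : ((x :: xs).dropWhile (fun y => !decide (y < 0))).length ≤ n := by
          rw [hdrop]
          have := List.length_dropWhile_le (fun y => !decide (y < 0)) xs
          simp at hn; omega
        rw [ih _ hlen _ (le_max_of_le_right (by positivity))]
        rw [lplAux_run (x :: xs) 0 le_rfl]
        omega

-- ===== VERDICT (by name: the statement is the Claim_ definition above) =====
theorem longest_positive_length_spec : Claim_equal_longest_positive_length := by
  intro returns _
  unfold Spec_longest_positive_length longest_positive_length longest_positive_length_alt
  rw [lplFold_eq returns 0 0 le_rfl le_rfl, lplGo_eq returns.length returns le_rfl 0 le_rfl]
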